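-- pv_equiv track=rewrite | github.com/loveLynch/wsn_share | draw/node_env.py | set_in_node_point
-- ===== SOURCE A (Python) =====
-- def set_in_node_point(i, j):
--     """
--     :param i: 子区域x轴起点
--     :param j: 子区域y轴起点
--     :return:
--     """
--     x_mat = []
--     y_mat = []
--     i_edge = i + 110
--     j_edge = j + 110
--     j_pre = j
--     while i <= i_edge:
--         while j <= j_edge:
--             x_mat.append(i)
--             y_mat.append(j)
--             j += 20
--         i += 20
--         j = j_pre
--     return x_mat, y_mat
-- ===== SOURCE B (Python) =====
-- def set_in_node_point(i, j):
--     # The grid spans i..i+110 / j..j+110 step 20, hence always exactly 6x6 = 36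
--     # points; compute each coordinate in closed form from the flat index k.
--     q, r = zip(*[divmod(k, 6) for k in range(36)])
--     return [i + 20 * a for a in q], [j + 20 * b for b in r]
-- ===== Notes on version B (the rewrite author's own statement) =====
-- stated objective: alternative
-- what changed: A walks the grid with nested while loops appending point-by-point; B notes that the bounds are relative (i..i+110 step 20), so the grid is always exactly 6x6=36 points, and computes each coordinate in closed form from a flat index k via divmod(k,6) - no nested loops, no mutable cursors.
import Mathlib
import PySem

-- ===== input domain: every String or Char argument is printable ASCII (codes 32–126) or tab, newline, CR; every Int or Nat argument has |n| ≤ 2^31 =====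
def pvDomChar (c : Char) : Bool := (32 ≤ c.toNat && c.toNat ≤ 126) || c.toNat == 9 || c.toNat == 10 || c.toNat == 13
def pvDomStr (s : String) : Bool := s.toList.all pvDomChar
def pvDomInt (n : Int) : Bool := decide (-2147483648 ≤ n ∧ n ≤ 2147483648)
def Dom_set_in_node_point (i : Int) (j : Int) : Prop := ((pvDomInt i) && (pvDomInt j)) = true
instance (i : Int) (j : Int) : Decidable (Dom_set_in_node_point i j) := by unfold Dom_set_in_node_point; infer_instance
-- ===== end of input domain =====

-- B replaces A's nested while loops by a closed-form flat enumeration: the grid is always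
-- exactly 6x6 = 36 points, each coordinate computed from a flat index k via divmod(k,6).


-- ===== PORT A =====
-- inner while loop: while j <= j_edge: x_mat.append(i); y_mat.append(j); j += 20
def pvInnerA (i jEdge j : Int) (x y : List Int) : List Int × List Int :=
  if j ≤ jEdge then pvInnerA i jEdge (j + 20) (x ++ [i]) (y ++ [j]) else (x, y)
termination_by (jEdge - j + 20).toNat
decreasing_by omega

-- outer while loop: while i <= i_edge: <inner>; i += 20; j = j_pre
def pvOuterA (iEdge jEdge jPre i : Int) (x y : List Int) : List Int × List Int :=
  if i ≤ iEdge then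
    let r := pvInnerA i jEdge jPre x y
    pvOuterA iEdge jEdge jPre (i + 20) r.1 r.2
  else (x, y)
termination_by (iEdge - i + 20).toNat
decreasing_by omega

def set_in_node_point (i : Int) (j : Int) : List Int × List Int :=
  pvOuterA (i + 110) (j + 110) j i [] []

-- ===== PORT B =====
-- q, r = zip(*[divmod(k, 6) for k in range(36)]); return ([i+20*a for a in q], [j+20*b for b in r])
def set_in_node_point_alt (i : Int) (j : Int) : List Int × List Int :=
  let qr := (PySem.List.pyRange 0 36 1).map (fun k => (PySem.Int.floordiv k 6, PySem.Int.mod k 6))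
  let q := qr.map Prod.fst
  let r := qr.map Prod.snd
  (q.map (fun a => i + 20 * a), r.map (fun b => j + 20 * b))

-- ===== PRECONDITION & SPEC =====
def Spec_set_in_node_point (i : Int) (j : Int) (out : List Int × List Int) : Prop := out = set_in_node_point_alt i j
instance (i : Int) (j : Int) (out : List Int × List Int) : Decidable (Spec_set_in_node_point i j out) := by unfold Spec_set_in_node_point; infer_instance

-- ===== CLAIM =====
def Claim_equal_set_in_node_point : Prop := ∀ (i : Int) (j : Int), Dom_set_in_node_point i j → Spec_set_in_node_point i j (set_in_node_point i j)

-- ===== LEMMAS AND PROOFS =====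

theorem pvInnerA_eval (i j : Int) (x y : List Int) :
    pvInnerA i (j + 110) j x y =
      (x ++ [i, i, i, i, i, i], y ++ [j, j + 20, j + 40, j + 60, j + 80, j + 100]) := by
  rw [pvInnerA, if_pos (by omega), pvInnerA, if_pos (by omega), pvInnerA, if_pos (by omega),
      pvInnerA, if_pos (by omega), pvInnerA, if_pos (by omega), pvInnerA, if_pos (by omega),
      pvInnerA, if_neg (by omega)]
  simp [List.cons.injEq]
  omega

-- ===== VERDICT =====
theorem set_in_node_point_spec : Claim_equal_set_in_node_point := by
  intro i j _
  unfold Spec_set_in_node_point set_in_node_point set_in_node_point_alt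
  rw [pvOuterA, if_pos (by omega)]
  simp only [pvInnerA_eval, List.nil_append]
  rw [pvOuterA, if_pos (by omega)]
  simp only [pvInnerA_eval]
  rw [pvOuterA, if_pos (by omega)]
  simp only [pvInnerA_eval]
  rw [pvOuterA, if_pos (by omega)]
  simp only [pvInnerA_eval]
  rw [pvOuterA, if_pos (by omega)]
  simp only [pvInnerA_eval]
  rw [pvOuterA, if_pos (by omega)]
  simp only [pvInnerA_eval]
  rw [pvOuterA, if_neg (by omega)]
  simp [PySem.List.pyRange, PySem.Int.floordiv, PySem.Int.mod, List.range_succ]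
  omega
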